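-- pv_equiv track=rewrite | github.com/Rdrg974/holbertonschool-machine_learning | supervised_learning/decision_tree/8-build_decision_tree.py | right_child_add_prefix
-- ===== SOURCE A (Python) =====
-- def right_child_add_prefix(text):
--     """
--     Adds a prefix for the right child in the string representation.
--
--     Parameters:
--     - text (str): The text representation of the child node.
--
--     Returns:
--     - str: The text with the appropriate prefix for the right child.
--     """
--     lines = text.split("\n")
--     new_text = "    +--" + lines[0] + "\n"
--     for x in lines[1:]:
--         new_text += ("       " + x) + "\n"
--     if new_text.endswith("\n"):
--         new_text = new_text[:-1]
--     return new_text
-- ===== SOURCE B (Python) =====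
-- def right_child_add_prefix(text):
--     return "    +--" + text.replace("\n", "\n       ")
-- ===== Notes on version B (the rewrite author's own statement) =====
-- stated objective: simpler
-- what changed: B replaces A's split/loop/join-and-strip-trailing-newline pipeline with a single str.replace inserting the continuation prefix after every newline, prepending the header once.
import Mathlib
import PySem

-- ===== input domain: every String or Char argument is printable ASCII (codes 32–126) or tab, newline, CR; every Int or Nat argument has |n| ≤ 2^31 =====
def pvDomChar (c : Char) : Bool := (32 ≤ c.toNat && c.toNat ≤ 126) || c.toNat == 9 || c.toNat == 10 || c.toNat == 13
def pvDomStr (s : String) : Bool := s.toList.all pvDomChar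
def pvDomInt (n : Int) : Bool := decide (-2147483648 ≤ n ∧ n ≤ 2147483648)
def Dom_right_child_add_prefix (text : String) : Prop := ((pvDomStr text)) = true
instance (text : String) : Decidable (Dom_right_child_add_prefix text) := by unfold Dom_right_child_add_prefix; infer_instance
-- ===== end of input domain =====

-- B replaces A's split/loop/strip pipeline with one str.replace; objective: simpler.

-- ===== PORT A =====
def right_child_add_prefix (text : String) : String :=
  let lines : List (List Char) := (PySem.Chars.split? text.toList ['\n']).getD []
  let new_text := "    +--".toList ++ ((PySem.List.pyGet? lines 0).getD []) ++ ['\n']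
  let new_text := (PySem.List.slice lines (some 1) none).foldl
      (fun acc x => acc ++ ("       ".toList ++ x) ++ ['\n']) new_text
  let new_text := if PySem.Chars.endswith new_text ['\n']
      then PySem.Chars.slice new_text none (some (-1)) else new_text
  String.ofList new_text

-- ===== PORT B =====
def right_child_add_prefix_alt (text : String) : String :=
  String.ofList ("    +--".toList ++ PySem.Chars.replace text.toList ['\n'] "\n       ".toList)

-- ===== PRECONDITION & SPEC =====
def Spec_right_child_add_prefix (text : String) (out : String) : Prop := out = right_child_add_prefix_alt text
instance (text : String) (out : String) : Decidable (Spec_right_child_add_prefix text out) := by unfold Spec_right_child_add_prefix; infer_instance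

-- ===== CLAIM (what is proved, stated in full; the proofs are below) =====
def Claim_equal_right_child_add_prefix : Prop := ∀ (text : String), Dom_right_child_add_prefix text → Spec_right_child_add_prefix text (right_child_add_prefix text)

-- ===== LEMMAS AND PROOFS =====

/-- The lines of `cs` split at `'\n'`, in A's `split("\n")` sense (always nonempty). -/
def linesF : List Char → List (List Char)
  | [] => [[]]
  | c :: t => if c = '\n' then [] :: linesF t else List.modifyHead (c :: ·) (linesF t)

lemma linesF_ne_nil (cs : List Char) : linesF cs ≠ [] := by
  induction cs with
  | nil => simp [linesF]
  | cons c t ih =>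
    simp only [linesF]
    split
    · simp
    · cases h : linesF t <;> simp_all

lemma ic2 (sep a b : List Char) (l : List (List Char)) :
    List.intercalate sep (a :: b :: l) = a ++ sep ++ List.intercalate sep (b :: l) := by
  simp [List.intercalate, List.intersperse, List.append_assoc]

lemma splitOn_go_char (l : List Char) : ∀ (fuel : Nat) (cur : List Char)
    (acc : List (List Char)), l.length ≤ fuel →
    PySem.Chars.splitOn.go ['\n'] fuel l cur acc
      = acc.reverse ++ List.modifyHead (cur.reverse ++ ·) (linesF l) := by
  induction l with
  | nil =>
    intro fuel cur acc _
    cases fuel <;> simp [PySem.Chars.splitOn.go, linesF, List.modifyHead]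
  | cons c rest ih =>
    intro fuel cur acc hf
    cases fuel with
    | zero => simp at hf
    | succ f =>
      simp only [List.length_cons] at hf
      by_cases hc : c = '\n'
      · subst hc
        rw [PySem.Chars.splitOn.go]
        simp only [List.isPrefixOf, BEq.rfl, Bool.true_and, if_true,
          List.length_singleton, List.drop_one, List.tail_cons]
        rw [ih f [] (cur.reverse :: acc) (by omega)]
        cases h : linesF rest with
        | nil => exact absurd h (linesF_ne_nil rest)
        | cons x xs => simp [linesF, List.modifyHead, h]
      · rw [PySem.Chars.splitOn.go]
        have : ['\n'].isPrefixOf (c :: rest) = false := by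
          simp [List.isPrefixOf]; exact fun h => absurd h.symm hc
        rw [this]
        simp only [Bool.false_eq_true, if_false]
        rw [ih f (c :: cur) acc (by omega)]
        cases h : linesF rest with
        | nil => exact absurd h (linesF_ne_nil rest)
        | cons x xs =>
          simp [linesF, hc, List.modifyHead, h, List.append_assoc]

lemma splitOn_char (cs : List Char) :
    PySem.Chars.splitOn cs ['\n'] = linesF cs := by
  rw [PySem.Chars.splitOn, splitOn_go_char cs (cs.length + 1) [] [] (by omega)]
  cases h : linesF cs with
  | nil => exact absurd h (linesF_ne_nil cs)
  | cons x xs => simp [List.modifyHead]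

/-- What B's `replace`'s worker computes for the single-char pattern `'\n'`. -/
def replF (new : List Char) : List Char → List Char
  | [] => []
  | c :: t => if c = '\n' then new ++ replF new t else c :: replF new t

lemma replace_go_char (new : List Char) (l : List Char) : ∀ (fuel : Nat) (acc : List Char),
    l.length ≤ fuel →
    PySem.Chars.replace.go ['\n'] new fuel l acc = acc.reverse ++ replF new l := by
  induction l with
  | nil =>
    intro fuel acc _
    cases fuel <;> simp [PySem.Chars.replace.go, replF]
  | cons c rest ih =>
    intro fuel acc hf
    cases fuel with
    | zero => simp at hf
    | succ f =>
      simp only [List.length_cons] at hf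
      by_cases hc : c = '\n'
      · subst hc
        rw [PySem.Chars.replace.go]
        simp only [List.isPrefixOf, BEq.rfl, Bool.true_and, if_true,
          List.length_singleton, List.drop_one, List.tail_cons]
        rw [ih f (new.reverse ++ acc) (by omega)]
        simp [replF, List.append_assoc]
      · rw [PySem.Chars.replace.go]
        have : ['\n'].isPrefixOf (c :: rest) = false := by
          simp [List.isPrefixOf]; exact fun h => absurd h.symm hc
        rw [this]
        simp only [Bool.false_eq_true, if_false]
        rw [ih f (c :: acc) (by omega)]
        simp [replF, hc]

lemma replace_char (cs new : List Char) :
    PySem.Chars.replace cs ['\n'] new = replF new cs := by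
  rw [PySem.Chars.replace]
  simp only [List.isEmpty_cons, Bool.false_eq_true, if_false]
  exact replace_go_char new cs cs.length [] (le_refl _)

lemma replF_eq_intercalate (sp : List Char) (cs : List Char) :
    replF ('\n' :: sp) cs = List.intercalate ('\n' :: sp) (linesF cs) := by
  induction cs with
  | nil => simp [replF, linesF, List.intercalate]
  | cons c t ih =>
    by_cases hc : c = '\n'
    · subst hc
      simp only [replF, if_true, linesF, ih]
      cases h : linesF t with
      | nil => exact absurd h (linesF_ne_nil t)
      | cons x xs => rw [ic2]; simp
    · simp only [replF, hc, if_false, linesF, ih]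
      cases h : linesF t with
      | nil => exact absurd h (linesF_ne_nil t)
      | cons x xs =>
        cases xs with
        | nil => simp [List.modifyHead, List.intercalate]
        | cons y ys => simp [List.modifyHead, ic2]

lemma foldl_chunks (sp : List Char) (t : List (List Char)) : ∀ (acc : List Char),
    t.foldl (fun acc x => acc ++ (sp ++ x) ++ ['\n']) acc
      = acc ++ t.flatMap (fun x => sp ++ x ++ ['\n']) := by
  induction t with
  | nil => intro acc; simp
  | cons x t ih => intro acc; rw [List.foldl_cons, ih]; simp [List.append_assoc]

lemma ic_shift (sp h x : List Char) (t : List (List Char)) :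
    List.intercalate ('\n' :: sp) ((h ++ '\n' :: (sp ++ x)) :: t)
      = h ++ '\n' :: (sp ++ List.intercalate ('\n' :: sp) (x :: t)) := by
  cases t with
  | nil => simp [List.intercalate, List.intersperse]
  | cons y ys => rw [ic2, ic2]; simp [List.append_assoc]

lemma head_flat_eq_intercalate (sp : List Char) (t : List (List Char)) : ∀ (h : List Char),
    h ++ ['\n'] ++ t.flatMap (fun x => sp ++ x ++ ['\n'])
      = List.intercalate ('\n' :: sp) (h :: t) ++ ['\n'] := by
  induction t with
  | nil => intro h; simp [List.intercalate, List.intersperse]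
  | cons x t ih =>
    intro h
    have e1 : h ++ ['\n'] ++ (x :: t).flatMap (fun x => sp ++ x ++ ['\n'])
        = (h ++ '\n' :: (sp ++ x)) ++ ['\n'] ++ t.flatMap (fun x => sp ++ x ++ ['\n']) := by
      simp [List.flatMap_cons, List.append_assoc]
    rw [e1, ih, ic_shift, ic2]; simp

-- ===== VERDICT (by name: the statement is the Claim_ definition above) =====
theorem right_child_add_prefix_spec : Claim_equal_right_child_add_prefix := by
  intro text _
  unfold Spec_right_child_add_prefix right_child_add_prefix right_child_add_prefix_alt
  simp only [PySem.Chars.split?, List.isEmpty_cons, Bool.false_eq_true, if_false,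
    Option.getD_some, splitOn_char, PySem.List.slice_from_one, replace_char]
  cases h : linesF text.toList with
  | nil => exact absurd h (linesF_ne_nil text.toList)
  | cons x xs =>
    have hget : (PySem.List.pyGet? (x :: xs) 0).getD [] = x := by
      simp [PySem.List.pyGet?, PySem.List.pyIdx?]
    rw [hget, List.tail_cons, foldl_chunks]
    have hnl : ("\n       ".toList : List Char) = '\n' :: "       ".toList := by decide
    have e2 : "    +--".toList ++ x ++ ['\n'] ++ xs.flatMap (fun y => "       ".toList ++ y ++ ['\n'])
        = "    +--".toList ++ (x ++ ['\n'] ++ xs.flatMap (fun y => "       ".toList ++ y ++ ['\n'])) := by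
      simp [List.append_assoc]
    rw [e2, head_flat_eq_intercalate]
    have hend : PySem.Chars.endswith
        ("    +--".toList ++ (List.intercalate ('\n' :: "       ".toList) (x :: xs) ++ ['\n'])) ['\n'] = true := by
      simp [PySem.Chars.endswith, List.isSuffixOf]
    rw [hend]; rw [if_pos rfl]
    have hdl : ∀ (l : List Char), PySem.Chars.slice (l ++ ['\n']) none (some (-1)) = l := by
      intro l
      simp [PySem.Chars.slice_eq_listSlice, PySem.List.slice_to_neg_one]
    rw [show "    +--".toList ++ (List.intercalate ('\n' :: "       ".toList) (x :: xs) ++ ['\n'])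
        = ("    +--".toList ++ List.intercalate ('\n' :: "       ".toList) (x :: xs)) ++ ['\n'] from by
      simp]
    rw [hdl, hnl, replF_eq_intercalate, h]
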